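-- pv_equiv track=rewrite | github.com/martinb35/Bugger | questionable_utils.py | has_repro_steps
-- ===== SOURCE A (Python) =====
-- def has_repro_steps(text):
--     """Check if text contains indications of repro steps"""
--     if not text:
--         return False
--     desc_lower = text.lower()
--     step_indicators = [
--         'step 1', 'step 2', 'step 3', 'steps to reproduce', 'repro steps',
--         'reproduce:', 'steps:', 'to reproduce', 'how to reproduce',
--         'first', 'then', 'next', 'finally', 'expected', 'actual'
--     ]
--     if any(ind in desc_lower for ind in step_indicators):
--         return True
--     if any(f"{n}." in desc_lower for n in range(1, 5)):
--         return True
--     return False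
-- ===== SOURCE B (Python) =====
-- _PATTERNS = (
--     'step 1', 'step 2', 'step 3', 'steps to reproduce', 'repro steps',
--     'reproduce:', 'steps:', 'to reproduce', 'how to reproduce',
--     'first', 'then', 'next', 'finally', 'expected', 'actual',
--     '1.', '2.', '3.', '4.',
-- )
--
--
-- def has_repro_steps(text):
--     """Check if text contains indications of repro steps"""
--     if not text:
--         return False
--     t = text.lower()
--     return any(t.startswith(_PATTERNS, i) for i in range(len(t)))
-- ===== Notes on version B (the rewrite author's own statement) =====
-- stated objective: alternative
-- what changed: Replaces per-pattern substring scans (15 'in' tests plus a second loop over '1.'..'4.') by a single left-to-right position scan that tests all 19 patterns at once with one tuple startswith per position.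
import Mathlib
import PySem

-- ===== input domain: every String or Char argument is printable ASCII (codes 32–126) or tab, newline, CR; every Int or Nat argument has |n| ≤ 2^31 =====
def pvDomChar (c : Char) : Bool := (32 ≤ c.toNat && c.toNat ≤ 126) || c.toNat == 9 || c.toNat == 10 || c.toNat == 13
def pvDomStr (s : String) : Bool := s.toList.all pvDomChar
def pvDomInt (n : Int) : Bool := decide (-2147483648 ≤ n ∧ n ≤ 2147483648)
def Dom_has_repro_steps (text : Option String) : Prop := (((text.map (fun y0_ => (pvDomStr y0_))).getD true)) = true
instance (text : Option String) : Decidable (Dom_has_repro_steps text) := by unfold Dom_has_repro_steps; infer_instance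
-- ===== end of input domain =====

-- B replaces A's per-pattern substring scans (and the separate '1.'..'4.' loop) by one
-- left-to-right position scan matching all 19 patterns at each index (objective: alternative).

-- ===== PORT A =====
def reproStepIndicators : List String :=
  ["step 1", "step 2", "step 3", "steps to reproduce", "repro steps",
   "reproduce:", "steps:", "to reproduce", "how to reproduce",
   "first", "then", "next", "finally", "expected", "actual"]

def has_repro_steps (text : Option String) : Bool :=
  match text with
  | none => false
  | some s =>
    if s = "" then false
    else
      let descLower := PySem.Str.lower s
      if reproStepIndicators.any (fun ind => PySem.Str.isIn ind descLower) then true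
      else if (PySem.List.pyRange 1 5 1).any
          (fun n => PySem.Str.isIn (PySem.Int.toStr n ++ ".") descLower) then true
      else false

-- ===== PORT B =====
def reproPats : List (List Char) :=
  ["step 1".toList, "step 2".toList, "step 3".toList, "steps to reproduce".toList,
   "repro steps".toList, "reproduce:".toList, "steps:".toList, "to reproduce".toList,
   "how to reproduce".toList, "first".toList, "then".toList, "next".toList,
   "finally".toList, "expected".toList, "actual".toList,
   "1.".toList, "2.".toList, "3.".toList, "4.".toList]

def has_repro_steps_alt (text : Option String) : Bool :=
  match text with
  | none => false
  | some s =>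
    if s = "" then false
    else
      let t := (PySem.Str.lower s).toList
      (List.range t.length).any
        (fun i => reproPats.any (fun p => PySem.Chars.startswith (t.drop i) p))

-- ===== PRECONDITION & SPEC =====
def Spec_has_repro_steps (text : Option String) (out : Bool) : Prop := out = has_repro_steps_alt text
instance (text : Option String) (out : Bool) : Decidable (Spec_has_repro_steps text out) := by unfold Spec_has_repro_steps; infer_instance

-- ===== CLAIM (what is proved, stated in full; the proofs are below) =====
def Claim_equal_has_repro_steps : Prop := ∀ (text : Option String), Dom_has_repro_steps text → Spec_has_repro_steps text (has_repro_steps text)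

-- ===== LEMMAS AND PROOFS =====

-- one substring test 'p in t' (p nonempty) equals the position scan restricted to that p
lemma isIn_eq_range_scan (pats : List (List Char)) (t : List Char)
    (hne : ∀ p ∈ pats, p ≠ []) :
    pats.any (fun p => PySem.Chars.isIn p t)
      = (List.range t.length).any
          (fun i => pats.any (fun p => PySem.Chars.startswith (t.drop i) p)) := by
  rw [Bool.eq_iff_iff]
  simp only [List.any_eq_true, List.mem_range, PySem.Chars.startswith_iff]
  constructor
  · rintro ⟨p, hp, hin⟩
    obtain ⟨j, hj⟩ := (PySem.Chars.exists_prefix_drop_iff_isIn p t).mpr hin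
    refine ⟨j, ?_, p, hp, hj⟩
    by_contra h
    have hdrop : t.drop j = [] := List.drop_eq_nil_of_le (by omega)
    rw [hdrop, List.prefix_nil] at hj
    exact hne p hp hj
  · rintro ⟨i, _, p, hp, hpre⟩
    exact ⟨p, hp, (PySem.Chars.exists_prefix_drop_iff_isIn p t).mp ⟨i, hpre⟩⟩

-- A's two 'any' loops together test exactly the 19 patterns of reproPats as substrings
lemma portA_any_eq (t : String) :
    ((reproStepIndicators.any (fun ind => PySem.Str.isIn ind t))
      || (PySem.List.pyRange 1 5 1).any
          (fun n => PySem.Str.isIn (PySem.Int.toStr n ++ ".") t))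
      = reproPats.any (fun p => PySem.Chars.isIn p t.toList) := by
  have hrange : PySem.List.pyRange 1 5 1 = [1, 2, 3, 4] := by decide
  simp only [hrange, reproStepIndicators, reproPats, List.any_cons, List.any_nil,
    PySem.Str.isIn_eq]
  have h1 : (PySem.Int.toStr 1 ++ ".").toList = "1.".toList := by decide
  have h2 : (PySem.Int.toStr 2 ++ ".").toList = "2.".toList := by decide
  have h3 : (PySem.Int.toStr 3 ++ ".").toList = "3.".toList := by decide
  have h4 : (PySem.Int.toStr 4 ++ ".").toList = "4.".toList := by decide
  rw [h1, h2, h3, h4]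
  simp only [Bool.or_false, Bool.or_assoc]

lemma reproPats_ne_nil : ∀ p ∈ reproPats, p ≠ [] := by decide

-- ===== VERDICT (by name: the statement is the Claim_ definition above) =====
theorem has_repro_steps_spec : Claim_equal_has_repro_steps := by
  intro text _
  unfold Spec_has_repro_steps has_repro_steps has_repro_steps_alt
  cases text with
  | none => rfl
  | some s =>
    by_cases hs : s = ""
    · simp [hs]
    · simp only [hs, reduceIte]
      rw [← isIn_eq_range_scan reproPats ((PySem.Str.lower s).toList) reproPats_ne_nil,
        ← portA_any_eq]
      rcases reproStepIndicators.any (fun ind => PySem.Str.isIn ind (PySem.Str.lower s)) with _ | _ <;>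
        rcases h2 : (PySem.List.pyRange 1 5 1).any
          (fun n => PySem.Str.isIn (PySem.Int.toStr n ++ ".") (PySem.Str.lower s)) with _ | _ <;>
        simp_all
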